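-- pv_equiv track=rewrite | github.com/Neob1844/sost-core | scripts/audit_miner_concentration.py | cluster_counts
-- ===== SOURCE A (Python) =====
-- from collections import Counter, defaultdict
-- from typing import Any, Dict, List, Optional, Tuple
--
-- CASCADE_BOUNDARIES = [600 + 60 * k for k in range(0, 18)]
--
-- CLUSTER_WINDOW_SEC = 5
--
-- def cluster_counts(intervals_by_miner: Dict[str, List[int]]
--                    ) -> Tuple[Dict[str, int], Dict[str, int]]:
--     """Count, per miner, how many of their intervals fall just past a
--     cascade boundary. Returns (cluster_count, total_count)."""
--     clusters: Dict[str, int] = defaultdict(int)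
--     totals: Dict[str, int] = defaultdict(int)
--     for m, ivals in intervals_by_miner.items():
--         for el in ivals:
--             totals[m] += 1
--             for b in CASCADE_BOUNDARIES:
--                 if b <= el <= b + CLUSTER_WINDOW_SEC:
--                     clusters[m] += 1
--                     break
--     return clusters, totals
-- ===== SOURCE B (Python) =====
-- from collections import defaultdict
-- from typing import Dict, List, Tuple
--
-- def cluster_counts(intervals_by_miner: Dict[str, List[int]]
--                    ) -> Tuple[Dict[str, int], Dict[str, int]]:
--     """Per-miner aggregation: totals[m] is just len(ivals), and the cluster
--     hits are counted in one pass with a closed-form arithmetic test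
--     (boundaries are 600+60k, k=0..17, each with a 5-second window), so an
--     interval is a hit iff 600 <= el <= 1625 and (el - 600) % 60 <= 5.
--     Miners with no intervals / no hits get no entry, as with defaultdicts."""
--     clusters: Dict[str, int] = defaultdict(int)
--     totals: Dict[str, int] = defaultdict(int)
--     for m, ivals in intervals_by_miner.items():
--         if ivals:
--             totals[m] += len(ivals)
--         c = sum(1 for el in ivals if 600 <= el <= 1625 and (el - 600) % 60 <= 5)
--         if c:
--             clusters[m] += c
--     return clusters, totals
-- ===== Notes on version B (the rewrite author's own statement) =====
-- stated objective: faster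
-- what changed: Per-miner aggregation replaces per-interval dict increments: totals[m] is added as len(ivals) in one step, and cluster hits are counted in a single pass using the closed-form test 600 <= el <= 1625 and (el-600) % 60 <= 5 instead of A's inner 18-element scan over CASCADE_BOUNDARIES with break.
import Mathlib
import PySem

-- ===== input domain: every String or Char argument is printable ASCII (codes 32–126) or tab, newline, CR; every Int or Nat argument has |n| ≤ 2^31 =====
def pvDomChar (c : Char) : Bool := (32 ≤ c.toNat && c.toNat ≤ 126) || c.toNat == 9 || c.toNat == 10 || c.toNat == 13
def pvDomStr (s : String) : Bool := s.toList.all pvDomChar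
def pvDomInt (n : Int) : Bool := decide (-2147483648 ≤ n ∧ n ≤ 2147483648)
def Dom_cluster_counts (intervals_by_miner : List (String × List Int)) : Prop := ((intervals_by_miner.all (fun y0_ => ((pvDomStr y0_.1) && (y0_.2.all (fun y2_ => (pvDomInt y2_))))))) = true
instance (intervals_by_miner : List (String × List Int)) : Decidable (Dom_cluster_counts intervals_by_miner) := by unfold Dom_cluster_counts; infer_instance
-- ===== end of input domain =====

-- B aggregates per miner (totals via len, hits via one counted pass with a closed-form
-- arithmetic test) instead of A's per-interval dict increments with an inner boundary scan
-- (objective: faster — a constant-factor win measured).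

-- ===== PORT A =====
-- CASCADE_BOUNDARIES = [600 + 60 * k for k in range(0, 18)]
def pvBoundaries : List Int := (PySem.List.pyRange 0 18 1).map (fun k => 600 + 60 * k)

-- the inner 'for b in CASCADE_BOUNDARIES: if b <= el <= b+5: clusters[m] += 1; break'
-- as a scan returning whether any boundary matched (break ⇒ at most one increment)
def pvScanHit (el : Int) : List Int → Bool
  | [] => false
  | b :: rest => if b ≤ el ∧ el ≤ b + 5 then true else pvScanHit el rest

def cluster_counts (intervals_by_miner : List (String × List Int)) : (List (String × Int)) × (List (String × Int)) :=
  let st := intervals_by_miner.foldl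
    (fun (st : PySem.Dict String Int × PySem.Dict String Int) p =>
      p.2.foldl
        (fun st el =>
          let totals := st.2.modify p.1 0 (· + 1)
          if pvScanHit el pvBoundaries then (st.1.modify p.1 0 (· + 1), totals)
          else (st.1, totals))
        st)
    (PySem.Dict.empty, PySem.Dict.empty)
  (st.1.items, st.2.items)

-- ===== PORT B =====
-- '600 <= el <= 1625 and (el - 600) % 60 <= 5'  (Python %: PySem.Int.mod)
def pvHitB (el : Int) : Bool :=
  decide (600 ≤ el) && decide (el ≤ 1625) && decide (PySem.Int.mod (el - 600) 60 ≤ 5)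

-- 'sum(1 for el in ivals if <hit>)' as a running-sum fold
def pvHitSum (ivals : List Int) : Int :=
  ivals.foldl (fun acc el => if pvHitB el then acc + 1 else acc) 0

def cluster_counts_alt (intervals_by_miner : List (String × List Int)) : (List (String × Int)) × (List (String × Int)) :=
  let st := intervals_by_miner.foldl
    (fun (st : PySem.Dict String Int × PySem.Dict String Int) p =>
      let totals := if p.2.isEmpty then st.2 else st.2.modify p.1 0 (· + (p.2.length : Int))
      let c := pvHitSum p.2
      let clusters := if c = 0 then st.1 else st.1.modify p.1 0 (· + c)
      (clusters, totals))
    (PySem.Dict.empty, PySem.Dict.empty)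
  (st.1.items, st.2.items)

-- ===== PRECONDITION & SPEC =====
def Spec_cluster_counts (intervals_by_miner : List (String × List Int)) (out : (List (String × Int)) × (List (String × Int))) : Prop := out = cluster_counts_alt intervals_by_miner
instance (intervals_by_miner : List (String × List Int)) (out : (List (String × Int)) × (List (String × Int))) : Decidable (Spec_cluster_counts intervals_by_miner out) := by unfold Spec_cluster_counts; infer_instance

-- ===== CLAIM (what is proved, stated in full; the proofs are below) =====
def Claim_equal_cluster_counts : Prop := ∀ (intervals_by_miner : List (String × List Int)), Dom_cluster_counts intervals_by_miner → Spec_cluster_counts intervals_by_miner (cluster_counts intervals_by_miner)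

-- ===== LEMMAS AND PROOFS =====
-- A's early-exit scan is List.any of the per-boundary test
lemma pvScanHit_eq_any (el : Int) (l : List Int) :
    pvScanHit el l = l.any (fun b => decide (b ≤ el ∧ el ≤ b + 5)) := by
  induction l with
  | nil => rfl
  | cons b rest ih => simp only [pvScanHit, List.any_cons, ih]; split_ifs with h <;> simp [h]

-- the two per-interval hit tests agree on every Int
lemma pvHit_eq (el : Int) : pvScanHit el pvBoundaries = pvHitB el := by
  have hb : pvBoundaries =
      [600, 660, 720, 780, 840, 900, 960, 1020, 1080, 1140, 1200, 1260,
       1320, 1380, 1440, 1500, 1560, 1620] := by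
    simp [pvBoundaries, PySem.List.pyRange_one]; decide
  have hm : PySem.Int.mod (el - 600) 60 = (el - 600) % 60 :=
    PySem.Int.mod_eq_emod_of_pos (by norm_num)
  rw [hb, pvScanHit_eq_any]
  unfold pvHitB
  rw [hm, Bool.coe_iff_coe.symm]
  simp only [List.any_cons, List.any_nil, Bool.or_eq_true, Bool.and_eq_true, decide_eq_true_eq,
    Bool.false_eq_true, or_false]
  omega

-- two increments at the same key fuse
lemma modify_modify (d : PySem.Dict String Int) (k : String) (a b : Int) :
    (d.modify k 0 (· + a)).modify k 0 (· + b) = d.modify k 0 (· + (a + b)) := by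
  show ((d.modify k 0 (· + a)).insert k ((d.modify k 0 (· + a)).getD k 0 + b)) = _
  rw [PySem.Dict.getD_modify_self]
  show (d.insert k (d.getD k 0 + a)).insert k (d.getD k 0 + a + b) = d.insert k (d.getD k 0 + (a + b))
  rw [PySem.Dict.insert_insert_self, add_assoc]

-- 'if n = 0 then skip else add n' absorbs a preceding single increment
def pvAddIf (d : PySem.Dict String Int) (k : String) (n : Int) : PySem.Dict String Int :=
  if n = 0 then d else d.modify k 0 (· + n)

lemma pvAddIf_succ (d : PySem.Dict String Int) (k : String) (n : Int) (hn : 0 ≤ n) :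
    pvAddIf (d.modify k 0 (· + 1)) k n = pvAddIf d k (n + 1) := by
  unfold pvAddIf
  rcases eq_or_ne n 0 with h | h
  · subst h; simp
  · rw [if_neg h, if_neg (by omega), modify_modify, add_comm 1 n]

-- A's inner per-interval fold over one miner's list, in closed form
lemma inner_fold (m : String) (ivals : List Int)
    (st : PySem.Dict String Int × PySem.Dict String Int) :
    ivals.foldl
      (fun st el =>
        let totals := st.2.modify m 0 (· + 1)
        if pvScanHit el pvBoundaries then (st.1.modify m 0 (· + 1), totals)
        else (st.1, totals))
      st
    = (pvAddIf st.1 m ((ivals.countP pvHitB : Nat) : Int),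
       pvAddIf st.2 m ((ivals.length : Nat) : Int)) := by
  induction ivals generalizing st with
  | nil => simp [pvAddIf]
  | cons el rest ih =>
    simp only [List.foldl_cons]
    rw [ih]
    simp only [pvHit_eq, List.countP_cons, List.length_cons]
    rcases h : pvHitB el with _ | _
    · simp only [Bool.false_eq_true, if_false]
      rw [pvAddIf_succ _ _ _ (Int.natCast_nonneg _)]
      push_cast
      rfl
    · simp only [if_true]
      rw [pvAddIf_succ _ _ _ (Int.natCast_nonneg _),
          pvAddIf_succ _ _ _ (Int.natCast_nonneg _)]
      push_cast
      rfl

-- B's running-sum counter is countP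
lemma pvHitSum_eq (ivals : List Int) : pvHitSum ivals = ((ivals.countP pvHitB : Nat) : Int) := by
  have key : ∀ a : Int, ivals.foldl (fun acc el => if pvHitB el then acc + 1 else acc) a
      = a + ((ivals.countP pvHitB : Nat) : Int) := by
    induction ivals with
    | nil => simp
    | cons el rest ih =>
      intro a
      simp only [List.foldl_cons, List.countP_cons, ih]
      rcases h : pvHitB el with _ | _
      · simp
      · simp [h]
        ring
  simpa [pvHitSum] using key 0

-- ===== VERDICT (by name: the statement is the Claim_ definition above) =====
theorem cluster_counts_spec : Claim_equal_cluster_counts := by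
  intro ibm _
  unfold Spec_cluster_counts cluster_counts cluster_counts_alt
  have hfun : ∀ (st : PySem.Dict String Int × PySem.Dict String Int) (p : String × List Int),
      p.2.foldl
        (fun st el =>
          let totals := st.2.modify p.1 0 (· + 1)
          if pvScanHit el pvBoundaries then (st.1.modify p.1 0 (· + 1), totals)
          else (st.1, totals))
        st
      = (let totals := if p.2.isEmpty then st.2 else st.2.modify p.1 0 (· + (p.2.length : Int))
         let c := pvHitSum p.2
         let clusters := if c = 0 then st.1 else st.1.modify p.1 0 (· + c)
         (clusters, totals)) := by
    intro st p
    rw [inner_fold]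
    simp only [pvHitSum_eq, pvAddIf]
    congr 1
    rcases p.2 with _ | ⟨x, xs⟩
    · simp
    · simp only [List.isEmpty_cons, Bool.false_eq_true, if_false, List.length_cons]
      rw [if_neg (by push_cast; omega)]
  simp only [funext (fun st => funext (fun p => hfun st p))]
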